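-- pv_equiv track=rewrite | github.com/Dzibay/RPG_GAME | main.py | is_fight
-- ===== SOURCE A (Python) =====
-- def is_fight(s):
--     first = None
--     for i in range(len(s)):
--         if s[i] == '<':
--             first = i
--         if s[i] == '>' and first is not None:
--             end = i
--             res = s[first:end]
--             if res[:6] == '<fight':
--                 return True
--     return False
-- ===== SOURCE B (Python) =====
-- def is_fight(s):
--     return any(p.startswith('fight') and '>' in p for p in s.split('<')[1:])
-- ===== Notes on version B (the rewrite author's own statement) =====
-- stated objective: faster
-- what changed: Replaced the manual per-character index loop that tracks the last '<' and re-slices the string at every '>' with a single s.split('<') plus any(p.startswith('fight') and '>' in p) over the pieces after a '<'.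
import Mathlib
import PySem

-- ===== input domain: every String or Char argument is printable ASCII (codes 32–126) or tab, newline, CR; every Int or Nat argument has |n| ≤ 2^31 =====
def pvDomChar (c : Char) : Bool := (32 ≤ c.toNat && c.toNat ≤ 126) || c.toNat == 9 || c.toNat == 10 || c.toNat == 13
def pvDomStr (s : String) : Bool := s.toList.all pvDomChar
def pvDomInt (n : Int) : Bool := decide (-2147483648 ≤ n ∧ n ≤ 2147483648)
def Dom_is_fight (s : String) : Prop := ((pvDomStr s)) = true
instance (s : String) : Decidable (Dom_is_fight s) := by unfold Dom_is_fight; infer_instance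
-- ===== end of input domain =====

-- B replaces A's manual index scan (tracking the last '<' and re-slicing at every '>')
-- by splitting on '<' and testing each piece after a '<' for startswith('fight') and a '>' (measured faster in a timing run).


-- ===== PORT A =====
-- the for-loop over range(len(s)) with state `first`, as structural recursion on the index
def isFightGoA (cs : List Char) (i : Nat) (first : Option Nat) : Bool :=
  if h : i < cs.length then
    let first' : Option Nat := if cs[i] = '<' then some i else first
    if cs[i] = '>' then
      match first' with
      | some f =>
          -- res = s[first:end]; res[:6] == '<fight'
          if PySem.List.slice (PySem.List.slice cs (some (f : Int)) (some (i : Int))) none (some 6)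
              = "<fight".toList then true
          else isFightGoA cs (i + 1) first'
      | none => isFightGoA cs (i + 1) first'
    else isFightGoA cs (i + 1) first'
  else false
termination_by cs.length - i

def is_fight (s : String) : Bool := isFightGoA s.toList 0 none

-- ===== PORT B =====
def is_fight_alt (s : String) : Bool :=
  (PySem.List.slice (PySem.Chars.splitOn s.toList "<".toList) (some 1) none).any
    (fun p => PySem.Chars.startswith p "fight".toList && PySem.Chars.isIn ">".toList p)

-- ===== PRECONDITION & SPEC =====
def Spec_is_fight (s : String) (out : Bool) : Prop := out = is_fight_alt s
instance (s : String) (out : Bool) : Decidable (Spec_is_fight s out) := by unfold Spec_is_fight; infer_instance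

-- ===== CLAIM (what is proved, stated in full; the proofs are below) =====
def Claim_equal_is_fight : Prop := ∀ (s : String), Dom_is_fight s → Spec_is_fight s (is_fight s)

-- ===== LEMMAS AND PROOFS =====

-- the character-buffer machine both sides are reduced to: buffer = text since the last '<' (none before any '<')
def goH : List Char → Option (List Char) → Bool
  | [], _ => false
  | c :: rest, none => if c = '<' then goH rest (some []) else goH rest none
  | c :: rest, some b =>
      if c = '<' then goH rest (some [])
      else if c = '>' then
        if PySem.Chars.startswith b "fight".toList then true else goH rest (some (b ++ [c]))
      else goH rest (some (b ++ [c]))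

-- reference form of splitOn on a single-char separator (direct accumulator recursion)
def mysplit : List Char → List Char → List (List Char)
  | [], cur => [cur.reverse]
  | c :: rest, cur => if c = '<' then cur.reverse :: mysplit rest [] else mysplit rest (c :: cur)

def notLt (x : Char) : Bool := x ≠ '<'

lemma notLt_lt : notLt '<' = false := rfl

lemma notLt_of_ne {x : Char} (h : ¬ x = '<') : notLt x = true := by simp [notLt, h]

lemma go_eq (l : List Char) : ∀ (fuel : Nat) (cur : List Char) (acc : List (List Char)),
    l.length < fuel →
    PySem.Chars.splitOn.go ['<'] fuel l cur acc = acc.reverse ++ mysplit l cur := by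
  induction l with
  | nil =>
    intro fuel cur acc hf
    cases fuel with
    | zero => omega
    | succ f => simp [PySem.Chars.splitOn.go, mysplit]
  | cons c rest ih =>
    intro fuel cur acc hf
    cases fuel with
    | zero => omega
    | succ f =>
      have hr : rest.length < f := by simpa using hf
      by_cases hc : c = '<'
      · subst hc
        simp only [PySem.Chars.splitOn.go, List.isPrefixOf, beq_self_eq_true, Bool.true_and,
          List.length_cons, List.length_nil, List.drop_succ_cons, List.drop_zero, if_pos]
        rw [ih f [] (cur.reverse :: acc) hr]
        simp [mysplit]
      · have hpre : List.isPrefixOf ['<'] (c :: rest) = false := by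
          simp [List.isPrefixOf]
          exact fun h => (hc h.symm).elim
        simp only [PySem.Chars.splitOn.go, hpre, Bool.false_eq_true, if_false]
        rw [ih f (c :: cur) acc hr]
        simp [mysplit, hc]

lemma splitOn_eq (cs : List Char) : PySem.Chars.splitOn cs ['<'] = mysplit cs [] := by
  rw [PySem.Chars.splitOn, go_eq cs (cs.length + 1) [] [] (by omega)]
  simp

lemma mysplit_cons (cs : List Char) : ∀ cur,
    mysplit cs cur = (cur.reverse ++ cs.takeWhile notLt) :: (mysplit cs []).tail := by
  induction cs with
  | nil => intro cur; simp [mysplit]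
  | cons c rest ih =>
    intro cur
    by_cases hc : c = '<'
    · subst hc; simp [mysplit, notLt_lt]
    · rw [show mysplit (c :: rest) cur = mysplit rest (c :: cur) by simp [mysplit, hc],
        show mysplit (c :: rest) [] = mysplit rest [c] by simp [mysplit, hc],
        List.takeWhile_cons, if_pos (notLt_of_ne hc), ih (c :: cur), ih [c]]
      simp

lemma isIn_gt (p : List Char) : PySem.Chars.isIn ['>'] p = decide ('>' ∈ p) := by
  by_cases h : '>' ∈ p
  · simp only [h, decide_true]
    refine (PySem.Chars.isIn_iff_infix _ _).mpr ?_
    obtain ⟨s, t, rfl⟩ := List.mem_iff_append.mp h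
    exact ⟨s, t, by simp⟩
  · simp only [h, decide_false]
    refine (PySem.Chars.isIn_eq_false_iff _ _).mpr ?_
    intro hinf
    exact h (hinf.mem (by simp))

lemma sw_gt (b t : List Char) (hb : PySem.Chars.startswith b "fight".toList = false) :
    PySem.Chars.startswith (b ++ '>' :: t) "fight".toList = false := by
  rw [Bool.eq_false_iff]
  intro h
  rw [PySem.Chars.startswith_iff] at h
  have h5 : ("fight".toList).length = 5 := rfl
  have htake : "fight".toList = (b ++ '>' :: t).take 5 := by
    have := List.prefix_iff_eq_take.mp h
    rwa [h5] at this
  by_cases hlen : 5 ≤ b.length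
  · rw [List.take_append_of_le_length hlen] at htake
    have : PySem.Chars.startswith b "fight".toList = true := by
      rw [PySem.Chars.startswith_iff, htake]
      exact List.take_prefix 5 b
    rw [this] at hb; exact absurd hb (by simp)
  · rw [Nat.not_le] at hlen
    have h1 : (b ++ '>' :: t)[b.length]? = some '>' := by
      rw [List.getElem?_append_right (le_refl _)]
      simp
    have h2 : ("fight".toList)[b.length]? = some '>' := by
      rw [htake, List.getElem?_take, if_pos hlen, h1]
    have hmem : '>' ∈ "fight".toList := List.mem_of_getElem? h2
    exact absurd hmem (by decide)

def predB (p : List Char) : Bool := PySem.Chars.startswith p "fight".toList && decide ('>' ∈ p)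

lemma stage2_some (cs : List Char) : ∀ b,
    goH cs (some b) =
      ((PySem.Chars.startswith (b ++ cs.takeWhile notLt) "fight".toList
          && decide ('>' ∈ cs.takeWhile notLt))
        || (mysplit cs []).tail.any predB) := by
  induction cs with
  | nil => intro b; simp [goH, mysplit]
  | cons c rest ih =>
    intro b
    by_cases hc : c = '<'
    · subst hc
      rw [show goH ('<' :: rest) (some b) = goH rest (some []) by simp [goH],
        ih [], List.takeWhile_cons, if_neg (by rw [notLt_lt]; exact Bool.false_ne_true),
        show mysplit ('<' :: rest) [] = [] :: mysplit rest [] by simp [mysplit]]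
      conv_rhs => rw [mysplit_cons rest []]
      simp [predB]
    · have htail : (mysplit (c :: rest) []).tail = (mysplit rest []).tail := by
        rw [show mysplit (c :: rest) [] = mysplit rest [c] by simp [mysplit, hc],
          mysplit_cons rest [c], mysplit_cons rest []]
        rfl
      rw [List.takeWhile_cons, if_pos (notLt_of_ne hc), htail]
      by_cases hg : c = '>'
      · subst hg
        by_cases hs : PySem.Chars.startswith b "fight".toList
        · have hs' : PySem.Chars.startswith b ['f', 'i', 'g', 'h', 't'] = true := hs
          rw [show goH ('>' :: rest) (some b) = true by simp [goH, hs']]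
          have h2 : PySem.Chars.startswith (b ++ '>' :: rest.takeWhile notLt)
              "fight".toList = true := by
            rw [PySem.Chars.startswith_iff]
            exact ((PySem.Chars.startswith_iff _ _).mp hs).trans (List.prefix_append _ _)
          rw [h2]
          simp
        · have hsf : PySem.Chars.startswith b "fight".toList = false := by simpa using hs
          have hsf' : PySem.Chars.startswith b ['f', 'i', 'g', 'h', 't'] = false := hsf
          rw [show goH ('>' :: rest) (some b) = goH rest (some (b ++ ['>'])) by
              simp [goH, hsf'],
            ih (b ++ ['>']),
            show b ++ ['>'] ++ rest.takeWhile notLt = b ++ '>' :: rest.takeWhile notLt by simp,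
            sw_gt b _ hsf]
          simp
      · rw [show goH (c :: rest) (some b) = goH rest (some (b ++ [c])) by simp [goH, hc, hg],
          ih (b ++ [c]),
          show b ++ [c] ++ rest.takeWhile notLt = b ++ c :: rest.takeWhile notLt by simp]
        have hgc : ¬ ('>' = c) := fun h => hg h.symm
        have : decide ('>' ∈ c :: rest.takeWhile notLt)
            = decide ('>' ∈ rest.takeWhile notLt) := by
          simp [List.mem_cons, hgc]
        rw [this]

lemma stage2_none (cs : List Char) : goH cs none = (mysplit cs []).tail.any predB := by
  induction cs with
  | nil => simp [goH, mysplit]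
  | cons c rest ih =>
    by_cases hc : c = '<'
    · subst hc
      rw [show goH ('<' :: rest) none = goH rest (some []) by simp [goH],
        stage2_some rest [],
        show mysplit ('<' :: rest) [] = [] :: mysplit rest [] by simp [mysplit]]
      conv_rhs => rw [mysplit_cons rest []]
      simp [predB]
    · rw [show goH (c :: rest) none = goH rest none by simp [goH, hc], ih,
        show mysplit (c :: rest) [] = mysplit rest [c] by simp [mysplit, hc],
        mysplit_cons rest [c], mysplit_cons rest []]
      rfl

lemma bufstep (cs : List Char) (f i : Nat) (hfi : f < i) (hi : i < cs.length) :
    (cs.drop (f + 1)).take (i + 1 - (f + 1)) = (cs.drop (f + 1)).take (i - (f + 1)) ++ [cs[i]] := by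
  have h1 : i + 1 - (f + 1) = (i - (f + 1)) + 1 := by omega
  rw [h1, List.take_add_one]
  have h2 : (cs.drop (f + 1))[i - (f + 1)]? = some cs[i] := by
    rw [List.getElem?_drop]
    have h3 : f + 1 + (i - (f + 1)) = i := by omega
    rw [h3, List.getElem?_eq_getElem hi]
  rw [h2]
  rfl

lemma stage1 : ∀ (k : Nat) (cs : List Char) (i : Nat) (first : Option Nat) (buf : Option (List Char)),
    cs.length ≤ i + k →
    (first = none ∧ buf = none ∨
      ∃ f, first = some f ∧ f < i ∧ i ≤ cs.length ∧ cs[f]? = some '<' ∧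
        buf = some ((cs.drop (f + 1)).take (i - (f + 1)))) →
    isFightGoA cs i first = goH (cs.drop i) buf := by
  intro k
  induction k with
  | zero =>
    intro cs i first buf hlen _
    have hge : ¬ i < cs.length := by omega
    rw [isFightGoA, dif_neg hge, List.drop_eq_nil_of_le (by omega)]
    cases buf <;> simp [goH]
  | succ k ih =>
    intro cs i first buf hlen hrel
    by_cases hi : i < cs.length
    · have hdrop : cs.drop i = cs[i] :: cs.drop (i + 1) := List.drop_eq_getElem_cons hi
      rw [isFightGoA, dif_pos hi, hdrop]
      by_cases hc : cs[i] = '<'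
      · have hrec : isFightGoA cs (i + 1) (some i) = goH (cs.drop (i + 1)) (some []) := by
          apply ih cs (i + 1) (some i) (some []) (by omega)
          refine Or.inr ⟨i, rfl, by omega, by omega, ?_, ?_⟩
          · rw [List.getElem?_eq_getElem hi, hc]
          · simp
        have hne : cs[i] ≠ '>' := by rw [hc]; decide
        cases buf <;> simp [goH, hc, hrec]
      · by_cases hg : cs[i] = '>'
        · rcases hrel with ⟨hf, hb⟩ | ⟨f, hf, hfi, _, hcf, hb⟩
          · subst hf; subst hb
            have hrec : isFightGoA cs (i + 1) none = goH (cs.drop (i + 1)) none :=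
              ih cs (i + 1) none none (by omega) (Or.inl ⟨rfl, rfl⟩)
            simp [goH, hg, hrec]
          · subst hf; subst hb
            have hflt : f < cs.length := by omega
            have hcv : cs[f] = '<' := by
              have := List.getElem?_eq_getElem hflt (l := cs)
              rw [this] at hcf; exact Option.some.inj hcf
            set b := (cs.drop (f + 1)).take (i - (f + 1)) with hbdef
            have hslice : PySem.List.slice
                (PySem.List.slice cs (some (f : Int)) (some (i : Int))) none (some 6)
                = '<' :: b.take 5 := by
              rw [PySem.List.slice_natCast]
              rw [PySem.List.slice_to _ (by norm_num)]
              rw [List.drop_eq_getElem_cons hflt, hcv]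
              have h4 : i - f = (i - (f + 1)) + 1 := by omega
              rw [h4, List.take_succ_cons, List.take_cons (by omega)]
              rfl
            have hcond : (PySem.List.slice
                (PySem.List.slice cs (some (f : Int)) (some (i : Int))) none (some 6)
                = "<fight".toList)
                ↔ PySem.Chars.startswith b "fight".toList = true := by
              rw [hslice, show ("<fight".toList : List Char) = '<' :: "fight".toList from rfl]
              rw [PySem.Chars.startswith_iff, List.prefix_iff_eq_take,
                show ("fight".toList).length = 5 from rfl]
              constructor
              · intro h; exact ((List.cons.injEq _ _ _ _).mp h).2.symm
              · intro h; rw [← h]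
            by_cases hs : PySem.Chars.startswith b "fight".toList
            · have hA : PySem.List.slice
                  (PySem.List.slice cs (some (f : Int)) (some (i : Int))) none (some 6)
                  = "<fight".toList := hcond.mpr hs
              have hs' : PySem.Chars.startswith b ['f', 'i', 'g', 'h', 't'] = true := hs
              simp [goH, hg, hA, hs']
            · have hA : ¬ (PySem.List.slice
                  (PySem.List.slice cs (some (f : Int)) (some (i : Int))) none (some 6)
                  = "<fight".toList) := fun h => hs (hcond.mp h)
              have hA' : ¬ (PySem.List.slice
                  (PySem.List.slice cs (some (f : Int)) (some (i : Int))) none (some 6)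
                  = ['<', 'f', 'i', 'g', 'h', 't']) := hA
              have hs' : PySem.Chars.startswith b ['f', 'i', 'g', 'h', 't'] = false := by
                simpa using hs
              have hrec : isFightGoA cs (i + 1) (some f)
                  = goH (cs.drop (i + 1)) (some (b ++ [cs[i]])) := by
                apply ih cs (i + 1) (some f) (some (b ++ [cs[i]])) (by omega)
                refine Or.inr ⟨f, rfl, by omega, by omega, hcf, ?_⟩
                rw [bufstep cs f i hfi hi]
              rw [hg] at hrec
              simp [goH, hg, hA', hs', hrec]
        · rcases hrel with ⟨hf, hb⟩ | ⟨f, hf, hfi, _, hcf, hb⟩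
          · subst hf; subst hb
            have hrec : isFightGoA cs (i + 1) none = goH (cs.drop (i + 1)) none :=
              ih cs (i + 1) none none (by omega) (Or.inl ⟨rfl, rfl⟩)
            simp [goH, hc, hg, hrec]
          · subst hf; subst hb
            set b := (cs.drop (f + 1)).take (i - (f + 1)) with hbdef
            have hrec : isFightGoA cs (i + 1) (some f)
                = goH (cs.drop (i + 1)) (some (b ++ [cs[i]])) := by
              apply ih cs (i + 1) (some f) (some (b ++ [cs[i]])) (by omega)
              refine Or.inr ⟨f, rfl, by omega, by omega, hcf, ?_⟩
              rw [bufstep cs f i hfi hi]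
            simp [goH, hc, hg, hrec]
    · have hge : ¬ i < cs.length := hi
      rw [isFightGoA, dif_neg hge, List.drop_eq_nil_of_le (by omega)]
      cases buf <;> simp [goH]

lemma alt_eq (s : String) : is_fight_alt s = (mysplit s.toList []).tail.any predB := by
  rw [is_fight_alt]
  rw [show ("<".toList : List Char) = ['<'] from rfl]
  rw [splitOn_eq, PySem.List.slice_from_one]
  congr 1
  funext p
  rw [show (">".toList : List Char) = ['>'] from rfl, isIn_gt]
  rfl

-- ===== VERDICT (by name: the statement is the Claim_ definition above) =====
theorem is_fight_spec : Claim_equal_is_fight := by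
  intro s _
  unfold Spec_is_fight
  rw [alt_eq, ← stage2_none]
  have := stage1 s.toList.length s.toList 0 none none (by omega) (Or.inl ⟨rfl, rfl⟩)
  simpa [is_fight] using this
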